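-- pv_equiv track=rewrite | github.com/yehuimmd/DeepLearning | PycharmProjects/tagging_rnn_tf/utils.py | chartags_to_words_BIO
-- ===== SOURCE A (Python) =====
-- def chartags_to_words_BIO(chars, tags):
--     words = list()
--     word = ''
--     for ch, tag in zip(chars, tags):
--         if tag == 'O':
--             if len(word) > 0:
--                 words.append(word)
--             word = ''
--         elif tag == 'B':
--             if len(word) > 0:
--                 words.append(word)
--             word = ''
--         word += ch
--     if len(word) > 0:
--         words.append(word)
--     return words
-- ===== SOURCE B (Python) =====
-- def chartags_to_words_BIO(chars, tags):
--     # Span-based decomposition: the head pair always starts a word; the word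
--     # extends over the following pairs whose tag is neither 'B' nor 'O'.
--     pairs = list(zip(chars, tags))
--     words = []
--     while pairs:
--         k = 1
--         while k < len(pairs) and pairs[k][1] not in ('B', 'O'):
--             k += 1
--         w = ''.join(ch for ch, _ in pairs[:k])
--         if w:
--             words.append(w)
--         pairs = pairs[k:]
--     return words
-- ===== Notes on version B (the rewrite author's own statement) =====
-- stated objective: alternative
-- what changed: B replaces A's running-accumulator fold (flush word on 'B'/'O', append at end) by a span decomposition: it zips once, then repeatedly takes the head pair plus the following pairs whose tag is neither 'B' nor 'O' as one word slice, joins its chars, and drops the slice.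
import Mathlib
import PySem

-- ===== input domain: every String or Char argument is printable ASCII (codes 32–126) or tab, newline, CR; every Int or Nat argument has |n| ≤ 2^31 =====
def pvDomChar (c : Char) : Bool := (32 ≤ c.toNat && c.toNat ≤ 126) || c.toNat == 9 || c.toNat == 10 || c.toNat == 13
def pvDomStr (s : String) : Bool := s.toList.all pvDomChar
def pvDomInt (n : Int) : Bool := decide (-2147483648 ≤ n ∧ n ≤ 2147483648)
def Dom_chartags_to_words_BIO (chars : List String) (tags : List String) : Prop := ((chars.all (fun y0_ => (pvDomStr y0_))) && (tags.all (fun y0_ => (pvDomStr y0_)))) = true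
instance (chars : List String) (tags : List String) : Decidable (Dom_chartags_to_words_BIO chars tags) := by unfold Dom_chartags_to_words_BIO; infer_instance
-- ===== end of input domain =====

-- B rebuilds the result span-by-span (word-start boundaries + slice joins) instead of A's
-- running accumulator fold; objective: alternative decomposition, same cost.

-- ===== PORT A =====
-- one zip step of A's loop: flush on 'O' or 'B', then word += ch
def pvStepA (st : List String × String) (p : String × String) : List String × String :=
  let st1 :=
    if p.2 == "O" then ((if st.2.length > 0 then st.1 ++ [st.2] else st.1), "")
    else if p.2 == "B" then ((if st.2.length > 0 then st.1 ++ [st.2] else st.1), "")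
    else st
  (st1.1, st1.2 ++ p.1)

def chartags_to_words_BIO (chars : List String) (tags : List String) : List String :=
  let st := (List.zip chars tags).foldl pvStepA ([], "")
  if st.2.length > 0 then st.1 ++ [st.2] else st.1

-- ===== PORT B =====
-- ''.join
def pvJoin : List String → String
  | [] => ""
  | c :: cs => c ++ pvJoin cs

-- pairs[k][1] not in ('B','O')
def pvNotBO (p : String × String) : Bool := !(p.2 == "B" || p.2 == "O")

-- the span loop of Source B: head pair plus the following non-'B'/'O'-tagged pairs form a word
def pvGo : List (String × String) → List String
  | [] => []
  | p :: rest =>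
    let seg := p :: rest.takeWhile pvNotBO
    let w := pvJoin (seg.map Prod.fst)
    (if w.length > 0 then [w] else []) ++ pvGo (rest.dropWhile pvNotBO)
termination_by l => l.length
decreasing_by
  simpa using Nat.lt_succ_of_le (List.length_dropWhile_le _ _)

def chartags_to_words_BIO_alt (chars : List String) (tags : List String) : List String :=
  pvGo (List.zip chars tags)

-- ===== PRECONDITION & SPEC =====
def Spec_chartags_to_words_BIO (chars : List String) (tags : List String) (out : List String) : Prop := out = chartags_to_words_BIO_alt chars tags
instance (chars : List String) (tags : List String) (out : List String) : Decidable (Spec_chartags_to_words_BIO chars tags out) := by unfold Spec_chartags_to_words_BIO; infer_instance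

-- ===== CLAIM (what is proved, stated in full; the proofs are below) =====
def Claim_equal_chartags_to_words_BIO : Prop := ∀ (chars : List String) (tags : List String), Dom_chartags_to_words_BIO chars tags → Spec_chartags_to_words_BIO chars tags (chartags_to_words_BIO chars tags)

-- ===== LEMMAS AND PROOFS =====

-- abstract description of A's suffix behaviour: the words still to be emitted,
-- given the current accumulated word w and the remaining zipped pairs
def pvS : String → List (String × String) → List String
  | w, [] => if w.length > 0 then [w] else []
  | w, p :: rest =>
    if p.2 == "O" || p.2 == "B" then
      (if w.length > 0 then [w] else []) ++ pvS p.1 rest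
    else pvS (w ++ p.1) rest

theorem pvA_S (L : List (String × String)) : ∀ (ws : List String) (w : String),
    (if (L.foldl pvStepA (ws, w)).2.length > 0
      then (L.foldl pvStepA (ws, w)).1 ++ [(L.foldl pvStepA (ws, w)).2]
      else (L.foldl pvStepA (ws, w)).1) = ws ++ pvS w L := by
  induction L with
  | nil =>
    intro ws w
    simp only [List.foldl_nil, pvS]
    split_ifs <;> simp
  | cons p rest ih =>
    intro ws w
    obtain ⟨c, t⟩ := p
    simp only [List.foldl_cons]
    by_cases hO : t = "O"
    · subst hO
      rw [show pvStepA (ws, w) (c, "O")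
            = ((if w.length > 0 then ws ++ [w] else ws), "" ++ c) from by simp [pvStepA]]
      rw [show pvS w ((c, "O") :: rest)
            = (if w.length > 0 then [w] else []) ++ pvS c rest from by simp [pvS]]
      rw [ih, show ("" ++ c : String) = c from by simp]
      split_ifs <;> simp
    · by_cases hB : t = "B"
      · subst hB
        have h1 : ("B" == "O") = false := by decide
        rw [show pvStepA (ws, w) (c, "B")
              = ((if w.length > 0 then ws ++ [w] else ws), "" ++ c) from by simp [pvStepA, h1]]
        rw [show pvS w ((c, "B") :: rest)
              = (if w.length > 0 then [w] else []) ++ pvS c rest from by simp [pvS, h1]]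
        rw [ih, show ("" ++ c : String) = c from by simp]
        split_ifs <;> simp
      · have h1 : (t == "O") = false := by simp [hO]
        have h2 : (t == "B") = false := by simp [hB]
        rw [show pvStepA (ws, w) (c, t) = (ws, w ++ c) from by simp [pvStepA, h1, h2]]
        rw [show pvS w ((c, t) :: rest) = pvS (w ++ c) rest from by simp [pvS, h1, h2]]
        exact ih ws (w ++ c)

theorem pvS_go_aux (L : List (String × String)) : ∀ (w : String),
    pvS w L =
      (let w' := w ++ pvJoin ((L.takeWhile pvNotBO).map Prod.fst);
       (if w'.length > 0 then [w'] else []) ++ pvGo (L.dropWhile pvNotBO)) := by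
  induction L with
  | nil => intro w; simp [pvS, pvJoin, pvGo]
  | cons p rest ih =>
    intro w
    by_cases h : pvNotBO p
    · have hBO : (p.2 == "O" || p.2 == "B") = false := by
        simp [pvNotBO] at h; simp [h]
      simp only [pvS, hBO, Bool.false_eq_true, if_false,
        List.takeWhile_cons_of_pos h, List.dropWhile_cons_of_pos h,
        List.map_cons, pvJoin]
      rw [ih (w ++ p.1), ← String.append_assoc]
    · have hBO : (p.2 == "O" || p.2 == "B") = true := by
        cases hb : p.2 == "B" <;> cases ho : p.2 == "O" <;> simp_all [pvNotBO]
      have hneg : ¬ pvNotBO p = true := by simp_all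
      simp only [pvS, hBO, if_true,
        List.takeWhile_cons_of_neg hneg, List.dropWhile_cons_of_neg hneg,
        List.map_nil, pvJoin]
      rw [ih p.1]
      conv_rhs => rw [pvGo]
      simp [pvJoin]

theorem pvS_go (L : List (String × String)) : pvS "" L = pvGo L := by
  cases L with
  | nil => simp [pvS, pvGo]
  | cons p rest =>
    rw [pvS_go_aux]
    by_cases h : pvNotBO p
    · simp only [List.takeWhile_cons_of_pos h, List.dropWhile_cons_of_pos h,
        List.map_cons, pvJoin]
      conv_rhs => rw [pvGo]
      simp [pvJoin, String.empty_append]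
    · have hneg : ¬ pvNotBO p = true := by simp_all
      simp [List.takeWhile_cons_of_neg hneg, List.dropWhile_cons_of_neg hneg, pvJoin]

-- ===== VERDICT (by name: the statement is the Claim_ definition above) =====
theorem chartags_to_words_BIO_spec : Claim_equal_chartags_to_words_BIO := by
  intro chars tags _
  unfold Spec_chartags_to_words_BIO chartags_to_words_BIO chartags_to_words_BIO_alt
  rw [show (let st := (List.zip chars tags).foldl pvStepA ([], "");
        if st.2.length > 0 then st.1 ++ [st.2] else st.1)
      = ([] : List String) ++ pvS "" (List.zip chars tags) from pvA_S _ [] ""]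
  rw [pvS_go]
  simp
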